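/-
  THE PROTECTED FRAME: what the prologue unit `f.P`, the epilogue unit `f.E` and the body segments `f.k` of EVERY protected function
  need (15 functions: Gif/Frames.lean; the template's assertions: Gif/Spec/ReaderSegs.lean; the three worked units:
  farm.gif/worked/DGifGetWord.P / .E / .1; the recipes with their traps: farm.gif/hints/protected_frame.md). Every lemma fits ANY
  `FrameLayout`, heap, forest and reader. `top` is always the ENTRY's stack pointer as a number (`(e.reg .rsp).toNat`, the address of
  the return-address slot). `ro`, `ro'` are `Fl.raOff` and `Fl.raOff − Fl.size` AS LITERALS: pass `(ro := 88) (ro' := 24)` and `rfl`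
  for `hro`, `hro'` (`Gif.Frames.<f>.raOff` is not syntactically `88`: with the literal the results match the assertions' text).

  §1  THE INLINE SHADOW STORES AS THE LAYOUT'S `storesMem`
      shadow_addr_shift          `b >>> 3 + c = shadowAddr (b.toNat / 8 + k)`      (`c` = the literal `0xC00000 + k`; the index register
                                 as the walker computed it in a PROLOGUE: `rsp >>> 3`)
      shadow_addr_index          `g + c = shadowAddr (g.toNat + k)`                (the index register as a word VARIABLE `g` with
                                 bounds: the EPILOGUE's form, no `>>> 3` in the walk's context)
      stores1_shift / stores2_shift / stores3_shift
                                 the nest of 1 / 2 / 3 stores `(M.writeLE (b >>> 3 + c₁) w₁ v₁)…` = `storesMem M (b.toNat / 8) [⟨k₁, w₁, v₁⟩, …]`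
      stores1_index / stores2_index / stores3_index
                                 the same for `(M.writeLE (g + c₁) w₁ v₁)…` = `storesMem M g.toNat […]`
      name_stores1 / name_stores2 / name_stores3
                                 from `w_mem : s.mem = <nest over M>`: `∃ M0, M0 = M ∧ s.mem = storesMem M0 (b.toNat / 8) […]`: the memory
                                 before the shadow stores gets a NAME, its nest of stack stores is never typed
  §2  READS THROUGH THE SHADOW STORES
      readLE_storesMem           `(storesMem M g0 ss).readLE a k = M.readLE a k` for `a + k ≤ C00000H` (saved registers, the return address)
      rd_storesMem               the same for `rd` (what the postconditions speak of)
  §3  THE PROLOGUE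
      after_prologue             THE STEP OF THE ENVIRONMENT: `HeapInv` with the own frame pushed ∧ `GifOK` ∧ `rem` unchanged, for
                                 `storesMem M0 ((top − ro) / 8) Fl.prologue` with `M0` = the entry's memory but for stack stores
      prologue_same              the footprint: `SameExcept (⟨lo, top⟩ :: shadowSpan (top − ro) (top − ro') :: ws) mem (storesMem M0 …)`
                                 (`ws := []`: `Start.same0`; `ws :=` the contract's windows: `Body.same`)
      prologue_same_rem          what `Start.same0` gives: the reader is where it was
      prologue_same_rd, prologue_same_readLE
                                 … and every read above the stack window (the contract's windows, the return address) is the entry's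
  §4  THE EPILOGUE
      HeapInv.frames_above       the callers' frames lie at or above the clean stack's end (the `hfr` of `after_epilogue`, from the ENTRY's `HeapInv`)
      after_epilogue             THE STEP OF THE ENVIRONMENT: `HeapInv` for the callers' frames with `top + 8` ∧ `GifOK` ∧ `rem` unchanged,
                                 for `storesMem mem ((top − ro) / 8) Fl.epilogue`
      epilogue_same              THE RESTORATION OF `Returned.same`: the frame's shadow span leaves the footprint (its bytes are 0 at
                                 the entry, and 0 again after the epilogue's stores)
  §5  THE BODY
      LiveIn.own                 a range inside an object of the own frame is live (a check goal on a local: `.accSmall`); a buffer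
                                 for a callee: `OutPtr.own`, `BufOK.own` (Carry.lean §4)
      Env.at_call                `Env` at a callee's entry, for the frame list with the own frame in front, from `Body.inv` / `Body.ok`,
                                 when only stack BELOW the body's stack pointer was written since (window `[lo, top)`: the return address)
      Env.at_call'               the same for a window `[lo, hi)` with `hi ≤ R.cur`: ALSO stores into locals of the own frame, which lie
                                 ABOVE the body's stack pointer (`error = 0` before DGifCloseFile) — no `store_stack` step first
      HeapPre.at_call            `HeapPre` at a callee's entry for a function WITHOUT a forest (the driver: gif_decode before DGifOpen,
                                 prog_main), from the entry's `HeapPre`, `SameRegion`, the body's `HeapInv` of the present heap and ONE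
                                 stack-region window `[lo, hi)`, `hi ≤ 800000H` (may reach above the body's stack pointer). For a
                                 function without a protected frame whose only store is the `call`'s push: `HeapPre.at_push` (HeapCarry.lean)
      HeapInv.stack_windows      `HeapInv` ∧ (`Consts → Consts`) through a footprint of windows inside the stack region `[700000H, 800000H)`
                                 (check calls' return addresses, spills, the fields of a report in a caller's frame)
      store_gif                  a store into a scalar field of gif keeps `HeapInv` ∧ `GifOK` ∧ `rem`
      store_stack                a store into the stack below the cursor (a spill, a check call's return address) keeps the three
      word16_le                  `(zeroExtend 32 x ||| zeroExtend 32 y <<< 8).toNat ≤ 65535` for bytes `x y` (`c[0] | c[1] << 8`)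

  THE RECIPE OF A PROLOGUE UNIT `f.P` (worked: farm.gif/worked/DGifGetWord.P):
    1. `v_entry he`, `obtain` the precondition, walk to the cut behind the last inline shadow store (`until [Gif.L.<f>.at_<hex>]`);
    2. `name_stores<k>` on `w_mem` (k = the number of the prologue's shadow stores): the memory before them is `M0`, and
       `hmem : s.mem = storesMem M0 (base / 8) Gif.Frames.<f>.prologue` after `rw [← hpro, e_base] at hmem`
       (`hpro : Gif.Frames.<f>.prologue = [literal list] := rfl`);
    3. about `M0` (a nest of STACK stores over `e.mem`: no `>>> 3` in sight): the footprint `hsame0` by `u_same`, each saved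
       register's slot by `u_read`; then `clear hM0 w_mem`;
    4. `after_prologue` gives `HeapInv` with the own frame pushed, `GifOK`, `rem` unchanged; `prologue_same` the footprint, once with
       `[]` (`Start.same0`) and once with the contract's windows (`Body.same`); `readLE_storesMem` reads a slot and the return address
       through the shadow stores;
    5. the exit assertion field by field; `abi` by `ProgX.Base.abiInv_of`.
  THE RECIPE OF AN EPILOGUE UNIT `f.E` (worked: farm.gif/worked/DGifGetWord.E):
    1. BEFORE the walk: the shadow index register as a word VARIABLE `b` with two bounds (`0xE0000 ≤ b.toNat`,
       `b.toNat + n ≤ 0x100000`) and `hbn : b.toNat = (top − ro) / 8`, then `clear` its defining equation: no `>>> 3` is in the walk's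
       context, and the walker reads the pops and the return address THROUGH the shadow store(s) by itself, from the slots
       `k_<r> := hbody.slot_<r>` and `k_ra := hbody.slot_ra`;
    2. walk to the `ret`: no side goal is left;
    3. `stores<k>_index`: `hmem : s.mem = storesMem v.mem ((top − ro) / 8) Gif.Frames.<f>.epilogue`;
    4. `after_epilogue` gives `HeapInv` for the callers' frames (`top + 8`), `GifOK`, `rem` unchanged; `epilogue_same` drops the frame's
       shadow span from the footprint (`Returned.same`); `rd_storesMem` carries the post's reads over the stores;
    5. `Returned.mk` field by field; `abi` by `ProgX.Base.abiInv_of`.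
-/
import Gif.Spec.Carry
import Gif.Spec.Words
namespace Gif.Spec
open X86 X86.User Asan ProgX.Base ProgX.Base.Spec

/-! ### 1. The inline shadow stores as the layout's `storesMem` -/

/-- **The address of an inline shadow store in a prologue**: `rbx + (0xC00000 + k)` with `rbx = base >> 3` as the walker computed it
is the shadow address of the granule `base / 8 + k`. `c` is the displacement as the walker folds it (a literal word). -/
theorem shadow_addr_shift (b c : Word) (k : Nat) (hb : b.toNat < 0x800000) (hc : c.toNat = 0xC00000 + k) (hk : k < 0x100000) :
    b >>> 3 + c = shadowAddr (b.toNat / 8 + k) := by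
  apply eq_shadowAddr
  have h3 := Asan.toNat_shr3 b
  rw [UInt64.toNat_add, h3, hc]
  omega

/-- **The address of an inline shadow store in an epilogue**, with the shadow index register as a WORD VARIABLE `g` (bounds only: no
`>>> 3` and no `/ 8` in the walk's context): `g + (0xC00000 + k)` is the shadow address of the granule `g + k`. -/
theorem shadow_addr_index (g c : Word) (k : Nat) (hg : g.toNat < 0x100000) (hc : c.toNat = 0xC00000 + k) (hk : k < 0x100000) :
    g + c = shadowAddr (g.toNat + k) := by
  apply eq_shadowAddr
  rw [UInt64.toNat_add, hc]
  omega

/-- **One inline shadow store** through `b >>> 3`, as the walker writes it, is the layout's `storesMem`. -/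
theorem stores1_shift (M : Mem) (b c1 : Word) (k1 w1 v1 : Nat) (hb : b.toNat < 0x800000)
    (h1 : c1.toNat = 0xC00000 + k1) (l1 : k1 < 0x100000) :
    M.writeLE (b >>> 3 + c1) w1 v1 = storesMem M (b.toNat / 8) [⟨k1, w1, v1⟩] := by
  rw [shadow_addr_shift b c1 k1 hb h1 l1]
  rfl

/-- **Two inline shadow stores** through `b >>> 3`. -/
theorem stores2_shift (M : Mem) (b c1 c2 : Word) (k1 w1 v1 k2 w2 v2 : Nat) (hb : b.toNat < 0x800000)
    (h1 : c1.toNat = 0xC00000 + k1) (l1 : k1 < 0x100000) (h2 : c2.toNat = 0xC00000 + k2) (l2 : k2 < 0x100000) :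
    (M.writeLE (b >>> 3 + c1) w1 v1).writeLE (b >>> 3 + c2) w2 v2 =
      storesMem M (b.toNat / 8) [⟨k1, w1, v1⟩, ⟨k2, w2, v2⟩] := by
  rw [shadow_addr_shift b c1 k1 hb h1 l1]
  rw [shadow_addr_shift b c2 k2 hb h2 l2]
  rfl

/-- **Three inline shadow stores** through `b >>> 3`. -/
theorem stores3_shift (M : Mem) (b c1 c2 c3 : Word) (k1 w1 v1 k2 w2 v2 k3 w3 v3 : Nat) (hb : b.toNat < 0x800000)
    (h1 : c1.toNat = 0xC00000 + k1) (l1 : k1 < 0x100000) (h2 : c2.toNat = 0xC00000 + k2) (l2 : k2 < 0x100000)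
    (h3 : c3.toNat = 0xC00000 + k3) (l3 : k3 < 0x100000) :
    ((M.writeLE (b >>> 3 + c1) w1 v1).writeLE (b >>> 3 + c2) w2 v2).writeLE (b >>> 3 + c3) w3 v3 =
      storesMem M (b.toNat / 8) [⟨k1, w1, v1⟩, ⟨k2, w2, v2⟩, ⟨k3, w3, v3⟩] := by
  rw [shadow_addr_shift b c1 k1 hb h1 l1]
  rw [shadow_addr_shift b c2 k2 hb h2 l2]
  rw [shadow_addr_shift b c3 k3 hb h3 l3]
  rfl

/-- **One inline shadow store** through the index variable `g` (an epilogue that clears the frame with one QWORD store). -/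
theorem stores1_index (M : Mem) (g c1 : Word) (k1 w1 v1 : Nat) (hg : g.toNat < 0x100000)
    (h1 : c1.toNat = 0xC00000 + k1) (l1 : k1 < 0x100000) :
    M.writeLE (g + c1) w1 v1 = storesMem M g.toNat [⟨k1, w1, v1⟩] := by
  rw [shadow_addr_index g c1 k1 hg h1 l1]
  rfl

/-- **Two inline shadow stores** through the index variable `g`. -/
theorem stores2_index (M : Mem) (g c1 c2 : Word) (k1 w1 v1 k2 w2 v2 : Nat) (hg : g.toNat < 0x100000)
    (h1 : c1.toNat = 0xC00000 + k1) (l1 : k1 < 0x100000) (h2 : c2.toNat = 0xC00000 + k2) (l2 : k2 < 0x100000) :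
    (M.writeLE (g + c1) w1 v1).writeLE (g + c2) w2 v2 = storesMem M g.toNat [⟨k1, w1, v1⟩, ⟨k2, w2, v2⟩] := by
  rw [shadow_addr_index g c1 k1 hg h1 l1]
  rw [shadow_addr_index g c2 k2 hg h2 l2]
  rfl

/-- **Three inline shadow stores** through the index variable `g`. -/
theorem stores3_index (M : Mem) (g c1 c2 c3 : Word) (k1 w1 v1 k2 w2 v2 k3 w3 v3 : Nat) (hg : g.toNat < 0x100000)
    (h1 : c1.toNat = 0xC00000 + k1) (l1 : k1 < 0x100000) (h2 : c2.toNat = 0xC00000 + k2) (l2 : k2 < 0x100000)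
    (h3 : c3.toNat = 0xC00000 + k3) (l3 : k3 < 0x100000) :
    ((M.writeLE (g + c1) w1 v1).writeLE (g + c2) w2 v2).writeLE (g + c3) w3 v3 =
      storesMem M g.toNat [⟨k1, w1, v1⟩, ⟨k2, w2, v2⟩, ⟨k3, w3, v3⟩] := by
  rw [shadow_addr_index g c1 k1 hg h1 l1]
  rw [shadow_addr_index g c2 k2 hg h2 l2]
  rw [shadow_addr_index g c3 k3 hg h3 l3]
  rfl

/-- **The memory before the inline shadow stores gets a NAME** (`M0`, with its defining equation: the nest of the prologue's stack
stores), and the walker's `w_mem` becomes `storesMem M0 …`: one store. `obtain ⟨M0, hM0, hmem⟩ := name_stores1 b c₁ k₁ w₁ v₁ w_mem …`: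
`M` is found by unification, the nest is never typed. -/
theorem name_stores1 {m M : Mem} (b c1 : Word) (k1 w1 v1 : Nat)
    (h : m = M.writeLE (b >>> 3 + c1) w1 v1) (hb : b.toNat < 0x800000)
    (h1 : c1.toNat = 0xC00000 + k1) (l1 : k1 < 0x100000) :
    ∃ M0, M0 = M ∧ m = storesMem M0 (b.toNat / 8) [⟨k1, w1, v1⟩] :=
  ⟨M, rfl, h.trans (stores1_shift M b c1 k1 w1 v1 hb h1 l1)⟩

/-- The same for two stores. -/
theorem name_stores2 {m M : Mem} (b c1 c2 : Word) (k1 w1 v1 k2 w2 v2 : Nat)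
    (h : m = (M.writeLE (b >>> 3 + c1) w1 v1).writeLE (b >>> 3 + c2) w2 v2) (hb : b.toNat < 0x800000)
    (h1 : c1.toNat = 0xC00000 + k1) (l1 : k1 < 0x100000) (h2 : c2.toNat = 0xC00000 + k2) (l2 : k2 < 0x100000) :
    ∃ M0, M0 = M ∧ m = storesMem M0 (b.toNat / 8) [⟨k1, w1, v1⟩, ⟨k2, w2, v2⟩] :=
  ⟨M, rfl, h.trans (stores2_shift M b c1 c2 k1 w1 v1 k2 w2 v2 hb h1 l1 h2 l2)⟩

/-- The same for three stores. -/
theorem name_stores3 {m M : Mem} (b c1 c2 c3 : Word) (k1 w1 v1 k2 w2 v2 k3 w3 v3 : Nat)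
    (h : m = ((M.writeLE (b >>> 3 + c1) w1 v1).writeLE (b >>> 3 + c2) w2 v2).writeLE (b >>> 3 + c3) w3 v3)
    (hb : b.toNat < 0x800000)
    (h1 : c1.toNat = 0xC00000 + k1) (l1 : k1 < 0x100000) (h2 : c2.toNat = 0xC00000 + k2) (l2 : k2 < 0x100000)
    (h3 : c3.toNat = 0xC00000 + k3) (l3 : k3 < 0x100000) :
    ∃ M0, M0 = M ∧ m = storesMem M0 (b.toNat / 8) [⟨k1, w1, v1⟩, ⟨k2, w2, v2⟩, ⟨k3, w3, v3⟩] :=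
  ⟨M, rfl, h.trans (stores3_shift M b c1 c2 c3 k1 w1 v1 k2 w2 v2 k3 w3 v3 hb h1 l1 h2 l2 h3 l3)⟩

/-! ### 2. Reads through the shadow stores -/

/-- **A read below the shadow region goes through the inline shadow stores** (the saved registers, the return address, every
field of the data space). `n` bounds the stores' granules: `hin` by `decide` for a concrete layout, `n := Fl.size / 8`. -/
theorem readLE_storesMem (M : Mem) (g0 n : Nat) (ss : List ShadowStore) (hin : ∀ s, s ∈ ss → s.idx + s.width ≤ n)
    (hg : g0 + n ≤ 0x200000) (a : Word) (k : Nat) (ha : a.toNat + k ≤ 0xC00000) :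
    (storesMem M g0 ss).readLE a k = M.readLE a k := by
  apply (storesMem_sameExcept M g0 n ss hin hg).readLE a k (by omega)
  intro w hw
  have e := List.mem_singleton.mp hw
  rw [e]
  simp only
  omega

/-- The same for a typed read `rd` (what the postconditions speak of). -/
theorem rd_storesMem (M : Mem) (g0 n : Nat) (ss : List ShadowStore) (hin : ∀ s, s ∈ ss → s.idx + s.width ≤ n)
    (hg : g0 + n ≤ 0x200000) (a k : Nat) (ha : a + k ≤ 0xC00000) : rd (storesMem M g0 ss) a k = rd M a k := by
  rw [rd_def, rd_def]
  apply readLE_storesMem M g0 n ss hin hg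
  rw [toNat_ofNat_addr a (by omega)]
  exact ha

/-! ### 3. The prologue -/

/-- **THE PROLOGUE STEP OF THE ENVIRONMENT**, for any protected frame `Fl`. `mem` is the memory at the function's entry, `M0` the
memory after the prologue's stack stores (pushes, the three header words: anything inside `[lo, top)`), and the prologue's inline
shadow stores follow. Then the heap's invariant holds with the own frame pushed and the clean stack ending at `top'` (the body's
stack pointer), the state invariant holds, and the reader is where it was. -/
theorem after_prologue {H : Heap} {rest : List Obj} {frames : List (Nat × FrameLayout)} {F : Forest} {R : Rd}
    {top lo top' ro : Nat} {mem M0 : Mem} {Fl : FrameLayout}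
    (hinv : HeapInv H rest frames (top + 8) mem) (hctx : Ctx rest frames R) (hok : GifOK H F R mem)
    (hF : Fl.OK) (hro : Fl.raOff = ro) (hra : top % 8 = 0) (hs : Mem.SameExcept [⟨lo, top⟩] mem M0) (hlo : 0x700000 ≤ lo)
    (ht : top' ≤ top - ro) (h8 : top' % 8 = 0) (hlo' : 0x700000 ≤ top') :
    HeapInv H rest ((top - ro, Fl) :: frames) top' (storesMem M0 ((top - ro) / 8) Fl.prologue) ∧
    GifOK H F R (storesMem M0 ((top - ro) / 8) Fl.prologue) ∧
    rem R (storesMem M0 ((top - ro) / 8) Fl.prologue) = rem R mem := by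
  subst hro
  have hcur := hctx.cursor_range hinv.shadow
  have hhi := hinv.shadow.stack.hi
  have hoff := hinv.heap.offStack
  have hroom := hinv.heap.room
  have hF' := hF
  obtain ⟨hs8, hpin, _, _, _, _, _, _, hr8, hrs⟩ := hF'
  -- the stack stores: no shadow byte, off the heap, below the cursor
  have hun : ShadowUntouched mem M0 := by
    apply hs.eqOn
    intro w hw
    have e := List.mem_singleton.mp hw
    rw [e]
    simp only
    omega
  have hinv0 : HeapInv H rest frames (top + 8) M0 := by
    apply hinv.sameExcept hun hs
    intro w hw
    have e := List.mem_singleton.mp hw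
    rw [e]
    left
    simp only
    omega
  have hok0 : GifOK H F R M0 := by
    apply hok.sameExcept hinv.heap ⟨hcur.1, hcur.2.1⟩ hs
    intro w hw
    have e := List.mem_singleton.mp hw
    rw [e]
    apply Loose.stack hinv.heap
    · simp only
      omega
    · simp only
      omega
    · simp only
      omega
  have hrem0 : rem R M0 = rem R mem := by
    apply rem_sameExcept hs (by omega)
    intro w hw
    have e := List.mem_singleton.mp hw
    rw [e]
    simp only
    omega
  -- the inline shadow stores
  have hg : (top - Fl.raOff) / 8 + Fl.size / 8 ≤ 0x200000 := by omega
  refine ⟨hinv0.prologue_ra hF hra ht h8 hlo', ?_, ?_⟩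
  · exact hok0.storesMem hinv0.heap hcur.2.1 _ (Fl.size / 8) Fl.prologue hpin hg
  · rw [← hrem0]
    apply rem_sameExcept (storesMem_sameExcept M0 _ (Fl.size / 8) Fl.prologue hpin hg) (by omega)
    intro w hw
    have e := List.mem_singleton.mp hw
    rw [e]
    simp only
    omega

/-- **The footprint after the prologue**: the stack window and the shadow span of the frame's area `[top − ro, top − ro')`, in
front of any other windows `ws` (`[]` for `Start.same0`; the contract's windows for `Body.same`). -/
theorem prologue_same {top lo ro ro' : Nat} {mem M0 : Mem} {Fl : FrameLayout} (hF : Fl.OK) (hro : Fl.raOff = ro)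
    (hro' : Fl.raOff - Fl.size = ro') (hra : top % 8 = 0)
    (htop : top ≤ 0x800000) (hb : ro ≤ top) (hs : Mem.SameExcept [⟨lo, top⟩] mem M0) (ws : List Span) :
    Mem.SameExcept (⟨lo, top⟩ :: shadowSpan (top - ro) (top - ro') :: ws) mem
      (storesMem M0 ((top - ro) / 8) Fl.prologue) := by
  subst hro
  subst hro'
  obtain ⟨hs8, hpin, _, _, _, _, _, _, hr8, hrs⟩ := hF
  have hg : (top - Fl.raOff) / 8 + Fl.size / 8 ≤ 0x200000 := by omega
  have h2 := storesMem_sameExcept M0 ((top - Fl.raOff) / 8) (Fl.size / 8) Fl.prologue hpin hg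
  intro a ha
  have ha1 := ha ⟨lo, top⟩ List.mem_cons_self
  have ha2 := ha (shadowSpan (top - Fl.raOff) (top - (Fl.raOff - Fl.size))) (List.mem_cons_of_mem _ List.mem_cons_self)
  unfold shadowSpan at ha2
  simp only at ha1 ha2
  have e1 : M0.read a = mem.read a := by
    apply hs a
    intro w hw
    have e := List.mem_singleton.mp hw
    rw [e]
    exact ha1
  have e2 : (storesMem M0 ((top - Fl.raOff) / 8) Fl.prologue).read a = M0.read a := by
    apply h2 a
    intro w hw
    have e := List.mem_singleton.mp hw
    rw [e]
    simp only
    omega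
  rw [e2, e1]

/-- **Behind the prologue the reader is where it was** (what `Start.same0` gives the first body segment): the cursor is a stack
object of a caller, at or above the return-address slot (`Ctx.cursor_range`). -/
theorem prologue_same_rem {R : Rd} {lo top b0 b1 : Nat} {mem mem' : Mem}
    (hs : Mem.SameExcept [⟨lo, top⟩, shadowSpan b0 b1] mem mem') (h1 : top ≤ R.cur) (h2 : R.cur + 16 ≤ 0x800000) :
    rem R mem' = rem R mem := by
  apply rem_sameExcept hs (by omega)
  intro w hw
  simp only [List.mem_cons, List.mem_nil_iff, or_false] at hw
  rcases hw with e | e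
  · rw [e]
    left
    exact h1
  · rw [e]
    right
    unfold shadowSpan
    simp only
    omega

/-- **Behind the prologue every read at or above the entry's stack pointer is the entry's** (the contract's windows: "untouched"
starts from here). -/
theorem prologue_same_rd {lo top b0 b1 : Nat} {mem mem' : Mem}
    (hs : Mem.SameExcept [⟨lo, top⟩, shadowSpan b0 b1] mem mem') (a k : Nat) (h1 : top ≤ a) (h2 : a + k ≤ 0xC00000) :
    rd mem' a k = rd mem a k := by
  apply hs.rd a k (by omega)
  intro w hw
  simp only [List.mem_cons, List.mem_nil_iff, or_false] at hw
  rcases hw with e | e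
  · rw [e]
    right
    exact h1
  · rw [e]
    left
    unfold shadowSpan
    simp only
    omega

/-- The same for the walker's read (the return-address slot: `a = e.reg .rsp`). -/
theorem prologue_same_readLE {lo top b0 b1 : Nat} {mem mem' : Mem}
    (hs : Mem.SameExcept [⟨lo, top⟩, shadowSpan b0 b1] mem mem') (a : Word) (k : Nat) (h1 : top ≤ a.toNat)
    (h2 : a.toNat + k ≤ 0xC00000) : mem'.readLE a k = mem.readLE a k := by
  apply hs.readLE a k (by omega)
  intro w hw
  simp only [List.mem_cons, List.mem_nil_iff, or_false] at hw
  rcases hw with e | e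
  · rw [e]
    right
    exact h1
  · rw [e]
    left
    unfold shadowSpan
    simp only
    omega

/-! ### 4. The epilogue -/

/-- **The callers' protected frames lie at or above the clean stack's end** (the `hfr` of `after_epilogue`, from the ENTRY's
invariant: `top` there is the entry's `rsp + 8`). -/
theorem _root_.Asan.HeapInv.frames_above {H : Heap} {rest : List Obj} {frames : List (Nat × FrameLayout)} {top : Nat} {mem : Mem}
    (h : HeapInv H rest frames top mem) : ∀ bF, bF ∈ frames → top ≤ bF.1 := by
  intro bF hbF
  obtain ⟨_, _, k3, _, _⟩ := h.shadow.stack.active bF hbF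
  exact k3

/-- **THE EPILOGUE STEP OF THE ENVIRONMENT**, for any protected frame `Fl`. `mem` is the memory before the epilogue's inline
shadow stores (`Done`'s), `hinv` its invariant with the own frame in front (`Body.inv`), `hctx` the ENTRY's context. Afterwards the
heap's invariant holds for the callers' frames with the clean stack ending at `top + 8` (the stack pointer after the `ret`), the
state invariant holds, the reader is where it was. -/
theorem after_epilogue {H : Heap} {rest : List Obj} {frames : List (Nat × FrameLayout)} {F : Forest} {R : Rd}
    {top top' ro : Nat} {mem : Mem} {Fl : FrameLayout} (hro : Fl.raOff = ro)
    (hinv : HeapInv H rest ((top - ro, Fl) :: frames) top' mem) (hctx : Ctx rest frames R) (hok : GifOK H F R mem)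
    (hra : top % 8 = 0) (hhi : top + 8 ≤ 0x800000) (hfr : ∀ bF, bF ∈ frames → top + 8 ≤ bF.1) :
    HeapInv H rest frames (top + 8) (storesMem mem ((top - ro) / 8) Fl.epilogue) ∧
    GifOK H F R (storesMem mem ((top - ro) / 8) Fl.epilogue) ∧
    rem R (storesMem mem ((top - ro) / 8) Fl.epilogue) = rem R mem := by
  subst hro
  have hcur := (hctx.push (top - Fl.raOff) Fl).cursor_range hinv.shadow
  have hact := hinv.shadow.stack.active (top - Fl.raOff, Fl) List.mem_cons_self
  simp only at hact
  obtain ⟨hF, hb8, hb1, hb2, _⟩ := hact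
  obtain ⟨hs8, _, hein, _, _, _, _, _, hr8, hrs⟩ := hF
  have hg : (top - Fl.raOff) / 8 + Fl.size / 8 ≤ 0x200000 := by omega
  refine ⟨hinv.epilogue_ra hra hhi hfr, ?_, ?_⟩
  · exact hok.storesMem hinv.heap hcur.2.1 _ (Fl.size / 8) Fl.epilogue hein hg
  · apply rem_sameExcept (storesMem_sameExcept mem _ (Fl.size / 8) Fl.epilogue hein hg) (by omega)
    intro w hw
    have e := List.mem_singleton.mp hw
    rw [e]
    simp only
    omega

/-- **THE FRAME'S SHADOW SPAN LEAVES THE FOOTPRINT: the restoration of `Returned.same`.** Between the prologue and the epilogue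
the footprint of a protected function has one window more than its contract: the shadow bytes of its frame (`Body.same`). They were
0 at the entry (the stack below `top + 8` is clean: `StackOK.clean`), and the epilogue's stores make them 0 again
(`FrameLayout.epilogue_clean`): so `Returned.same` holds for the contract's footprint. `m0` = the entry's memory with its invariant
`hinv0`, `m1` = the memory before the epilogue's stores with `hinv1` (`Body.inv`); `w` = the stack window, `ws` = the contract's
windows. -/
theorem epilogue_same {H : Heap} {rest : List Obj} {frames : List (Nat × FrameLayout)} {top top' ro ro' : Nat}
    {m0 m1 : Mem} {Fl : FrameLayout} {w : Span} {ws : List Span} (hro : Fl.raOff = ro) (hro' : Fl.raOff - Fl.size = ro')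
    (hinv0 : HeapInv H rest frames (top + 8) m0) (hinv1 : HeapInv H rest ((top - ro, Fl) :: frames) top' m1)
    (hra : top % 8 = 0)
    (hsame : Mem.SameExcept (w :: shadowSpan (top - ro) (top - ro') :: ws) m0 m1) :
    Mem.SameExcept (w :: ws) m0 (storesMem m1 ((top - ro) / 8) Fl.epilogue) := by
  subst hro
  subst hro'
  have hact := hinv1.shadow.stack.active (top - Fl.raOff, Fl) List.mem_cons_self
  simp only at hact
  obtain ⟨hF, hb8, hb1, hb2, hp⟩ := hact
  have hlo := hinv1.shadow.stack.lo
  have hc1 := FrameLayout.epilogue_clean hF hb8 hb2 hp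
  have hc0 := hinv0.shadow.stack.clean
  obtain ⟨hs8, _, hein, _, _, _, _, _, hr8, hrs⟩ := hF
  have hg : (top - Fl.raOff) / 8 + Fl.size / 8 ≤ 0x200000 := by omega
  have h2 := storesMem_sameExcept m1 ((top - Fl.raOff) / 8) (Fl.size / 8) Fl.epilogue hein hg
  intro a ha
  by_cases hin : 0xC00000 + (top - Fl.raOff) / 8 ≤ a.toNat ∧ a.toNat < 0xC00000 + (top - Fl.raOff) / 8 + Fl.size / 8
  · -- a shadow byte of the frame: 0 in both memories
    have ea : a = shadowAddr (a.toNat - 0xC00000) := eq_shadowAddr a _ (by omega)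
    have z1 := hc1 (a.toNat - 0xC00000) (by omega) (by omega)
    have z0 := hc0 (a.toNat - 0xC00000) (by omega) (by omega)
    unfold shadowOf at z1 z0
    rw [← ea] at z1 z0
    apply UInt8.toNat_inj.mp
    rw [z1, z0]
  · -- any other byte: neither the epilogue's stores nor the function wrote it
    have e2 : (storesMem m1 ((top - Fl.raOff) / 8) Fl.epilogue).read a = m1.read a := by
      apply h2 a
      intro x hx
      have e := List.mem_singleton.mp hx
      rw [e]
      simp only
      omega
    rw [e2]
    apply hsame a
    intro x hx
    rcases List.mem_cons.mp hx with e | hx'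
    · rw [e]
      exact ha w List.mem_cons_self
    · rcases List.mem_cons.mp hx' with e | hx''
      · rw [e]
        unfold shadowSpan
        simp only
        omega
      · exact ha x (List.mem_cons_of_mem _ hx'')

/-! ### 5. The body -/

/-- **A range inside an object of the own protected frame is live** in the frame list with the own frame in front: what a check
goal on a local asks (`(LiveIn.own _ ho h1 h2).accSmall hbody.inv.shadow hun …`). `ho` names the object by its NUMBERS, as for
`OutPtr.own` (Carry.lean §4): `have ho : (⟨top − 88 + 32, 2, .stack⟩ : Obj) ∈ Gif.Frames.DGifGetWord.objsAt (top − 88) :=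
List.mem_cons_self`. -/
theorem _root_.ProgX.Base.LiveIn.own (others : List Obj) {frames : List (Nat × FrameLayout)} {base : Nat} {Fl : FrameLayout}
    {a n : Nat} (ho : (⟨a, n, .stack⟩ : Obj) ∈ Fl.objsAt base) {b k : Nat} (h1 : a ≤ b) (h2 : b + k ≤ a + n) :
    LiveIn others ((base, Fl) :: frames) b k := by
  refine ⟨⟨a, n, .stack⟩, ?_, h1, h2⟩
  rw [stackObjs_cons]
  apply List.mem_append_left
  apply List.mem_append_left
  exact ho

/-- **`Env` AT THE ENTRY OF A CALLEE of a protected function, GENERAL FORM**: the frame list has the own frame in front. `henv` is the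
ENTRY's environment (for the static facts of `HeapPre`, the context, and where the cursor is), `hinv` / `hok` the body's invariants at
a memory `mem` (`Body.inv`, `Body.ok`: `top` = the body's stack pointer), and the callee's entry state `s` differs from `mem` by
stores in ONE window `[lo, hi)` of the stack region BELOW THE CURSOR (`hhi : hi ≤ R.cur`): the pushed return address, spills, and
stores into locals of the own frame, which lie ABOVE `top` (`error = 0` at RA − 88 before DGifCloseFile). `hs` by `rw [w_mem]; u_same`,
`hhi` by `omega` from `henv.ctx.cursor_range henv.heap.inv.shadow` (its third clause: `RA + 8 ≤ R.cur`). -/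
theorem Env.at_call' {H : Heap} {rest : List Obj} {frames : List (Nat × FrameLayout)} {F : Forest} {R : Rd} {e s : State}
    {base top lo hi : Nat} {Fl : FrameLayout} {mem : Mem} (henv : Env H rest frames F R e)
    (hinv : HeapInv H rest ((base, Fl) :: frames) top mem) (hok : GifOK H F R mem)
    (hs : Mem.SameExcept [⟨lo, hi⟩] mem s.mem) (hlo : 0x700000 ≤ lo) (hhi : hi ≤ R.cur)
    (hsp : (s.reg .rsp).toNat + 8 ≤ top) (h8 : (s.reg .rsp).toNat % 8 = 0) (hlo' : 0x700000 ≤ (s.reg .rsp).toNat + 8) :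
    Env H rest ((base, Fl) :: frames) F R s := by
  have hcur := henv.ctx.cursor_range henv.heap.inv.shadow
  have hoff := hinv.heap.offStack
  have hroom := hinv.heap.room
  have hun : ShadowUntouched mem s.mem := by
    apply hs.eqOn
    intro w hw
    have hw_eq := List.mem_singleton.mp hw
    rw [hw_eq]
    simp only
    omega
  have hinv' : HeapInv H rest ((base, Fl) :: frames) ((s.reg .rsp).toNat + 8) s.mem := by
    refine (hinv.sameExcept hun hs ?_).lower hsp (by omega) hlo'
    intro w hw
    have hw_eq := List.mem_singleton.mp hw
    rw [hw_eq]
    left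
    simp only
    omega
  refine ⟨⟨hinv', henv.heap.base, henv.heap.limit, henv.heap.text, henv.heap.offText⟩, henv.ctx.push base Fl, ?_⟩
  apply hok.sameExcept hinv.heap ⟨hcur.1, hcur.2.1⟩ hs
  intro w hw
  have hw_eq := List.mem_singleton.mp hw
  rw [hw_eq]
  apply Loose.stack hinv.heap
  · simp only
    omega
  · simp only
    omega
  · simp only
    exact hhi

/-- **`Env` AT THE ENTRY OF A CALLEE of a protected function**, when the only stores since the body's state were stack stores BELOW
the body's stack pointer `top` (spills, the pushed return address: `hs : Mem.SameExcept [⟨lo, top⟩] mem s.mem` by `rw [w_mem]; u_same`;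
`htop : top ≤ RA + 8` by `omega`). After a store into a local of the own frame use `Env.at_call'`. -/
theorem Env.at_call {H : Heap} {rest : List Obj} {frames : List (Nat × FrameLayout)} {F : Forest} {R : Rd} {e s : State}
    {base top lo : Nat} {Fl : FrameLayout} {mem : Mem} (henv : Env H rest frames F R e)
    (hinv : HeapInv H rest ((base, Fl) :: frames) top mem) (hok : GifOK H F R mem)
    (hs : Mem.SameExcept [⟨lo, top⟩] mem s.mem) (hlo : 0x700000 ≤ lo) (htop : top ≤ (e.reg .rsp).toNat + 8)
    (hsp : (s.reg .rsp).toNat + 8 ≤ top) (h8 : (s.reg .rsp).toNat % 8 = 0) (hlo' : 0x700000 ≤ (s.reg .rsp).toNat + 8) :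
    Env H rest ((base, Fl) :: frames) F R s := by
  have hcur := henv.ctx.cursor_range henv.heap.inv.shadow
  exact henv.at_call' hinv hok hs hlo (by omega) hsp h8 hlo'

/-- **`HeapPre` AT THE ENTRY OF A CALLEE of a protected function, AT HEAP LEVEL** (`Env.at_call'` for a function without a forest:
gif_decode before DGifOpen, prog_main): `hpre` is the ENTRY's `HeapPre` (for the static clauses: base, limit, text), for the entry's
heap `H₀` and the callers' frames; `hinv` the body's invariant for the PRESENT heap `H` (`hreg : SameRegion H₀ H`:
`SameRegion.refl H` before the first callee that changes the heap, the post's clause after it — `memcpy` under the heap gif_decode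
left) and the frame list with the own frame in front, at a memory `mem`; the callee's entry state `s` differs from `mem` by stores in
ONE window `[lo, hi)` of the stack region — the pushed return address, spills, AND stores into objects of the own frame, which lie
ABOVE the body's stack pointer (the cursor's two fields before DGifOpen): `hs` by `rw [w_mem]; u_same`. `ShadowUntouched` follows
from `hs`: no `v_untouched`. The three last hypotheses: `rw [w_rsp]; u_omega` each. -/
theorem HeapPre.at_call {H₀ H : Heap} {rest : List Obj} {frames frames' : List (Nat × FrameLayout)} {e s : State}
    {top lo hi : Nat} {mem : Mem} (hpre : HeapPre H₀ rest frames e) (hreg : SameRegion H₀ H)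
    (hinv : HeapInv H rest frames' top mem) (hs : Mem.SameExcept [⟨lo, hi⟩] mem s.mem) (hhi : hi ≤ 0x800000)
    (hsp : (s.reg .rsp).toNat + 8 ≤ top) (h8 : (s.reg .rsp).toNat % 8 = 0) (hlo' : 0x700000 ≤ (s.reg .rsp).toNat + 8) :
    HeapPre H rest frames' s := by
  have hbase : H.base = 0x800000 := hreg.1.trans hpre.base
  have hun : ShadowUntouched mem s.mem := by
    apply hs.eqOn
    intro w hw
    have hw_eq := List.mem_singleton.mp hw
    rw [hw_eq]
    simp only
    omega
  have hinv' : HeapInv H rest frames' ((s.reg .rsp).toNat + 8) s.mem := by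
    refine (hinv.sameExcept hun hs ?_).lower hsp (by omega) hlo'
    intro w hw
    have hw_eq := List.mem_singleton.mp hw
    rw [hw_eq, hbase]
    left
    left
    exact hhi
  exact ⟨hinv', hbase, hreg.2.trans hpre.limit, hpre.text, hpre.offText⟩

/-- **THE HEAP'S INVARIANT AND THE CONSTANTS THROUGH A FOOTPRINT INSIDE THE STACK REGION** (the return addresses of check calls,
spills, the fields of a report / an out-parameter in a caller's frame): every window lies in `[700000H, 800000H)`: off the heap's
region, off the shadow, off the image's constants. No `v_untouched` is needed. `hs` by `rw [w_mem]; u_same` over the windows the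
segment wrote; `hw` per window (`simp only [List.mem_cons, List.mem_nil_iff, or_false] at hw`, `rcases hw with rfl | rfl`). -/
theorem _root_.Asan.HeapInv.stack_windows {H : Heap} {rest : List Obj} {frames : List (Nat × FrameLayout)} {top : Nat}
    {mem mem' : Mem} {ws : List Span} (hinv : HeapInv H rest frames top mem) (hbase : H.base = 0x800000)
    (hs : Mem.SameExcept ws mem mem') (hw : ∀ w, w ∈ ws → 0x700000 ≤ w.lo ∧ w.hi ≤ 0x800000) :
    HeapInv H rest frames top mem' ∧ (Consts mem → Consts mem') := by
  have hun : ShadowUntouched mem mem' := by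
    apply hs.eqOn
    intro w hin
    have hw' := hw w hin
    omega
  refine ⟨hinv.sameExcept hun hs ?_, ?_⟩
  · intro w hin
    have hw' := hw w hin
    rw [hbase]
    left
    left
    exact hw'.2
  · intro hc
    apply hc.sameExcept hs
    intro w hin
    have hw' := hw w hin
    right
    omega

/-- **A store into a scalar field of gif** (`[0, 24)`: SWidth … AspectByte; `[40, 64)`: Image.Left … Interlace; `[96, 104)`: Error)
keeps the heap's invariant, the state invariant and the reader's measure. `hcur` is `⟨hc.1, hc.2.1⟩` of `Ctx.cursor_range`. -/
theorem store_gif {H : Heap} {rest : List Obj} {frames : List (Nat × FrameLayout)} {F : Forest} {R : Rd} {top : Nat}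
    {mem : Mem} (hinv : HeapInv H rest frames top mem) (hok : GifOK H F R mem)
    (hcur : 0x700000 ≤ R.cur ∧ R.cur + 16 ≤ 0x800000) (hbase : H.base = 0x800000) (a : Word) (k val : Nat)
    (hw : (F.gif ≤ a.toNat ∧ a.toNat + k ≤ F.gif + 24) ∨ (F.gif + 40 ≤ a.toNat ∧ a.toNat + k ≤ F.gif + 64) ∨
      (F.gif + 96 ≤ a.toNat ∧ a.toNat + k ≤ F.gif + 104)) :
    HeapInv H rest frames top (mem.writeLE a k val) ∧ GifOK H F R (mem.writeLE a k val) ∧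
      rem R (mem.writeLE a k val) = rem R mem := by
  have hgin := hok.owns.inside hinv.heap (o := (F.gif, 120)) List.mem_cons_self
  simp only at hgin
  have hs : Mem.SameExcept [⟨a.toNat, a.toNat + k⟩] mem (mem.writeLE a k val) :=
    Mem.SameExcept.writeLE _ mem a k val (by omega) ⟨_, List.mem_cons_self, Nat.le_refl _, Nat.le_refl _⟩
  refine ⟨hinv.writeLE_live hok.gif_live a k val (by omega) (by omega), ?_, ?_⟩
  · apply hok.sameExcept hinv.heap hcur hs
    intro w hw'
    have e := List.mem_singleton.mp hw'
    rw [e]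
    right
    simp only
    omega
  · apply rem_sameExcept hs (by omega)
    intro w hw'
    have e := List.mem_singleton.mp hw'
    rw [e]
    simp only
    omega

/-- **A store into the stack below the cursor** (a spill, the return address that the `call` of a check routine pushes) keeps the
heap's invariant, the state invariant and the reader's measure. -/
theorem store_stack {H : Heap} {rest : List Obj} {frames : List (Nat × FrameLayout)} {F : Forest} {R : Rd} {top : Nat}
    {mem : Mem} (hinv : HeapInv H rest frames top mem) (hok : GifOK H F R mem)
    (hcur : 0x700000 ≤ R.cur ∧ R.cur + 16 ≤ 0x800000) (a : Word) (k val : Nat)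
    (h1 : 0x700000 ≤ a.toNat) (h2 : a.toNat + k ≤ R.cur) :
    HeapInv H rest frames top (mem.writeLE a k val) ∧ GifOK H F R (mem.writeLE a k val) ∧
      rem R (mem.writeLE a k val) = rem R mem := by
  have hoff := hinv.heap.offStack
  have hroom := hinv.heap.room
  have hs : Mem.SameExcept [⟨a.toNat, a.toNat + k⟩] mem (mem.writeLE a k val) :=
    Mem.SameExcept.writeLE _ mem a k val (by omega) ⟨_, List.mem_cons_self, Nat.le_refl _, Nat.le_refl _⟩
  refine ⟨hinv.writeLE_out a k val (by omega) (by omega) (by omega), ?_, ?_⟩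
  · apply hok.sameExcept hinv.heap hcur hs
    intro w hw'
    have e := List.mem_singleton.mp hw'
    rw [e]
    apply Loose.stack hinv.heap
    · simp only
      omega
    · simp only
      omega
    · simp only
      omega
  · apply rem_sameExcept hs (by omega)
    intro w hw'
    have e := List.mem_singleton.mp hw'
    rw [e]
    simp only
    omega

/-- **The word `c[0] | c[1] << 8` fits 16 bits** (dgif_lib.c:749 `UNSIGNED_LITTLE_ENDIAN(c[0], c[1])`: `movzx ebp, c[0] ;
movzx eax, c[1] ; shl eax, 8 ; or ebp, eax`, as the walker leaves it). -/
theorem word16_le (x y : BitVec 8) : (BitVec.zeroExtend 32 x ||| BitVec.zeroExtend 32 y <<< 8).toNat ≤ 65535 := by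
  have hx := x.isLt
  have hy := y.isLt
  rw [BitVec.toNat_or, BitVec.toNat_shiftLeft]
  simp only [BitVec.zeroExtend, BitVec.toNat_setWidth]
  have h1 : x.toNat % 2 ^ 32 < 2 ^ 16 := by omega
  have h2 : ((y.toNat % 2 ^ 32) <<< 8) % 2 ^ 32 < 2 ^ 16 := by
    rw [Nat.shiftLeft_eq]
    omega
  have h3 := Nat.or_lt_two_pow h1 h2
  omega

end Gif.Spec
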